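-- pv_equiv track=rewrite | github.com/Darksword333/Python-Project | archive/archives/mare.py | grille_init
-- ===== SOURCE A (Python) =====
-- def grille_vide(n):
--     """   paramètre: n entier (dimension de la grille carree)
--     valeur retournée:  tableau nxn réprésentant une  grille  de caractères vide:
--     """
--     grille = [[' ' for i in range(n)] for j in range(n)]
--     return grille
--
-- def grille_init(n):   # grille  début jeu selon les règles
--     """
--     paramètre:    n entier (dimension de la grille carree) -
--     valeur retournée: un tableau nxn réprésentant la grille au début du jeu
--     grille[i][j]='*' (noir)   si  ( i+j < n-1)     ou   (i+j = n-1   et i >n//2)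
--                 ='o' (blanc)  si  ( i+j > n-1)     ou   (i+j = n-1   et i <n//2)
--     grille[n//2][n//2]=' '
--     """
--     grille = grille_vide(n)   # creation grille vide
--     # placement des '*' et 'o' selon la definition de la grille initiale du jeu
--     for i in range(n):
--         for j in range(n):
--             if i+j < n-1:
--                 grille[i][j] = '*'
--             elif   i+j > n-1:
--                 grille[i][j] = 'o'
--             else :   # i+j = n-1
--                 grille[i][j] = '*'  if i>=n//2 else 'o'
--             if n % 2 == 1:
--                 grille[n//2][n//2]= ' '
--     return grille
-- ===== SOURCE B (Python) =====
-- def _swap(c):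
--     return 'o' if c == '*' else '*' if c == 'o' else c
--
-- def grille_init(n):
--     # Mirror construction: build only the top half of the rows, then obtain the
--     # bottom half by half-turn rotation of the top with colours swapped
--     # (the game position is point-symmetric); odd n adds an explicit middle row.
--     m = n // 2
--     top = [['*'] * (n - 1 - i) + ['o'] * (i + 1) for i in range(m)]
--     bottom = [[_swap(c) for c in reversed(row)] for row in reversed(top)]
--     if n % 2 == 1:
--         return top + [['*'] * m + [' '] + ['o'] * m] + bottom
--     return top + bottom
-- ===== Notes on version B (the rewrite author's own statement) =====
-- stated objective: alternative
-- what changed: Instead of filling an n-by-n blank grid cell by cell with if/elif tests, B exploits the position's half-turn point symmetry: it builds only the top half of the rows as star/o runs, produces the bottom half by reversing those rows and swapping colours, and inserts an explicit middle row when n is odd.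
-- outside the precondition, e.g. on grille_init(-1): A returns [], B returns [[' ']]; on grille_init(-3): A returns [], B returns [[' ']]
import Mathlib
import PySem

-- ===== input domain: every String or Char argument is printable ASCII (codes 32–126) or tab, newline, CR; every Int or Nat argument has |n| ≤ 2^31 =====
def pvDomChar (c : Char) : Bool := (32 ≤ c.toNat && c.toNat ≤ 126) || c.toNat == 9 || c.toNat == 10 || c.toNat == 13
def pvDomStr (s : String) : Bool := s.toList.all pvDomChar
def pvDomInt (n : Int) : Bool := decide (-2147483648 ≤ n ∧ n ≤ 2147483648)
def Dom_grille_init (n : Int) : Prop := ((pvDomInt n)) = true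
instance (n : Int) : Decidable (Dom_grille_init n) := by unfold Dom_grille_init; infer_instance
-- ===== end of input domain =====

-- B exploits the position's half-turn point symmetry: it builds only the top half of the rows
-- as runs, mirrors them (reversed, colours swapped) for the bottom half, and inserts a middle
-- row for odd n, instead of A's per-cell if/elif fill of a blank square grid.  Objective: alternative.

-- ===== PORT A =====
-- grille[i][j] = v; the loop indices satisfy 0 ≤ i, j < n, so .toNat is exact here
def pvSet (g : List (List String)) (i j : Int) (v : String) : List (List String) :=
  g.modify i.toNat (fun row => row.set j.toNat v)

def grille_vide (n : Int) : List (List String) :=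
  (PySem.List.pyRange 0 n 1).map (fun _j => (PySem.List.pyRange 0 n 1).map (fun _i => " "))

-- body of A's inner loop: the if/elif/else write, then the centre write for odd n
def pvStep (n i : Int) (g : List (List String)) (j : Int) : List (List String) :=
  let g1 :=
    if i + j < n - 1 then pvSet g i j "*"
    else if i + j > n - 1 then pvSet g i j "o"
    else pvSet g i j (if i ≥ PySem.Int.floordiv n 2 then "*" else "o")
  if PySem.Int.mod n 2 = 1 then
    pvSet g1 (PySem.Int.floordiv n 2) (PySem.Int.floordiv n 2) " "
  else g1

def grille_init (n : Int) : List (List String) :=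
  (PySem.List.pyRange 0 n 1).foldl (fun g i =>
    (PySem.List.pyRange 0 n 1).foldl (pvStep n i) g)
    (grille_vide n)

-- ===== PORT B =====
def pvSwap (c : String) : String := if c = "*" then "o" else if c = "o" then "*" else c

def grille_init_alt (n : Int) : List (List String) :=
  let m := PySem.Int.floordiv n 2
  let top := (PySem.List.pyRange 0 m 1).map (fun i =>
    List.replicate (n - 1 - i).toNat "*" ++ List.replicate (i + 1).toNat "o")
  let bottom := top.reverse.map (fun row => row.reverse.map pvSwap)
  if PySem.Int.mod n 2 = 1 then
    top ++ [List.replicate m.toNat "*" ++ [" "] ++ List.replicate m.toNat "o"] ++ bottom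
  else top ++ bottom

-- ===== PRECONDITION & SPEC =====
-- Pre_ excludes negative odd n — outside the game's natural domain of grid sizes — where
-- A happens to return [] while B's unconditional middle-row append yields [[' ']].
def Pre_grille_init (n : Int) : Prop := ¬ (n < 0 ∧ PySem.Int.mod n 2 = 1)
instance (n : Int) : Decidable (Pre_grille_init n) := by unfold Pre_grille_init; infer_instance
def pvWitness_grille_init : Int := (5)

def Spec_grille_init (n : Int) (out : List (List String)) : Prop := out = grille_init_alt n
instance (n : Int) (out : List (List String)) : Decidable (Spec_grille_init n out) := by unfold Spec_grille_init; infer_instance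

-- ===== CLAIM (what is proved, stated in full; the proofs are below) =====
def Claim_equal_grille_init : Prop := ∀ (n : Int), Dom_grille_init n → Pre_grille_init n → Spec_grille_init n (grille_init n)

-- ===== LEMMAS AND PROOFS =====

-- the value A writes at cell (i, j)
def cellV (n i j : Int) : String :=
  if i + j < n - 1 then "*" else if i + j > n - 1 then "o"
  else if i ≥ PySem.Int.floordiv n 2 then "*" else "o"

-- the per-cell description of row i
def rowP (n i : Int) : List String :=
  List.replicate (n - 1 - i).toNat "*" ++ [if i ≥ PySem.Int.floordiv n 2 then "*" else "o"]
    ++ List.replicate i.toNat "o"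

-- canonical form both ports are reduced to: every row from rowP, centre blanked when odd
def pvCanon (n : Int) : List (List String) :=
  if PySem.Int.mod n 2 = 1 then
    ((PySem.List.pyRange 0 n 1).map (fun i => rowP n i)).modify
      (PySem.Int.floordiv n 2).toNat (fun row => row.set (PySem.Int.floordiv n 2).toNat " ")
  else (PySem.List.pyRange 0 n 1).map (fun i => rowP n i)

-- generic List.modify facts
theorem pv_modify_modify {α : Type} (g : List α) (r : Nat) (f h : α → α) :
    (g.modify r f).modify r h = g.modify r (fun x => h (f x)) := by
  apply List.ext_getElem? ; intro t
  simp only [List.getElem?_modify]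
  rcases g[t]? with _ | x <;> simp
  split <;> simp_all

theorem pv_modify_comm {α : Type} (g : List α) {r s : Nat} (hrs : r ≠ s) (f h : α → α) :
    (g.modify r f).modify s h = (g.modify s h).modify r f := by
  apply List.ext_getElem? ; intro t
  simp only [List.getElem?_modify]
  rcases g[t]? with _ | x <;> simp
  split <;> split <;> simp_all

theorem pv_modify_id {α : Type} (g : List α) (r : Nat) :
    g.modify r (fun x => x) = g := by
  apply List.ext_getElem? ; intro t
  simp [List.getElem?_modify]

theorem pv_modify_congr {α : Type} (g : List α) (r : Nat) (f h : α → α)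
    (hfh : ∀ x, g[r]? = some x → f x = h x) :
    g.modify r f = g.modify r h := by
  apply List.ext_getElem? ; intro t
  simp only [List.getElem?_modify]
  by_cases hrt : r = t
  · subst hrt
    rcases hx : g[r]? with _ | y
    · simp
    · simp [hfh y hx]
  · simp [hrt]

theorem pv_modify_append {α : Type} (xs ys : List α) (f : α → α) :
    (xs ++ ys).modify xs.length f = xs ++ ys.modify 0 f := by
  apply List.ext_getElem? ; intro t
  simp only [List.getElem?_modify, List.getElem?_append]
  by_cases ht : t < xs.length
  · simp only [ht, if_pos]
    have : ¬ (xs.length = t) := by omega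
    simp [this]
  · simp only [ht, ite_false]
    by_cases he : xs.length = t
    · subst he; simp
    · have h0 : ¬ (0 = t - xs.length) := by omega
      simp [he, h0]

-- a later centre write absorbs an earlier one through any single intervening write
theorem pv_center_absorb (g : List (List String)) (r c mr mc : Nat) (v : String)
    (f : List String → List String)
    (hf : f = (fun row => row.set c v) ∨ ∃ rp : List String, f = (fun _ => rp)) :
    (((g.modify mr (fun row => row.set mc " ")).modify r f).modify mr (fun row => row.set mc " "))
      = (g.modify r f).modify mr (fun row => row.set mc " ") := by
  by_cases hr : r = mr
  · subst hr
    rw [pv_modify_modify, pv_modify_modify, pv_modify_modify]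
    apply pv_modify_congr
    intro x _
    rcases hf with hf | ⟨rp, hf⟩ <;> subst hf
    · by_cases hc : c = mc
      · subst hc; simp [List.set_set]
      · show ((x.set mc " ").set c v).set mc " " = (x.set c v).set mc " "
        rw [List.set_comm _ _ (Ne.symm hc), List.set_set]
    · simp
  · rw [pv_modify_comm g (Ne.symm hr), pv_modify_modify]
    simp [List.set_set]

-- row-level: writing cells 0..k-1 of a length-N row yields the mapped pattern prefix
theorem pv_rowFold (n i : Int) (row : List String) (k : Nat)
    (hk : k ≤ n.toNat) (hlen : row.length = n.toNat) :
    ((List.range k).map (fun t : Nat => (t : Int))).foldl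
        (fun r j => r.set j.toNat (cellV n i j)) row
      = (List.range k).map (fun j : Nat => cellV n i (j : Int)) ++ row.drop k := by
  induction k with
  | zero => simp
  | succ k ih =>
    have hkl : k < row.length := by omega
    rw [List.range_succ, List.map_append, List.foldl_append, ih (by omega)]
    simp only [List.map_cons, List.map_nil, List.foldl_cons, List.foldl_nil, Int.toNat_natCast]
    rw [List.set_append_right _ _ (by simp)]
    rw [List.drop_eq_getElem_cons hkl]
    simp only [List.length_map, List.length_range, Nat.sub_self, List.set_cons_zero,
      List.map_append, List.map_cons, List.map_nil]
    rw [List.append_assoc]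
    rfl

-- the per-cell row equals the canonical row
theorem pv_rowP_eq (n i : Int) (h0 : 0 ≤ i) (hi : i < n) :
    rowP n i = (List.range n.toNat).map (fun j : Nat => cellV n i (j : Int)) := by
  apply List.ext_getElem
  · simp [rowP]; omega
  · intro j h1 h2
    simp only [List.getElem_map, List.getElem_range]
    unfold rowP cellV
    have hjn : j < n.toNat := by simpa using h2
    simp only [List.getElem_append, List.length_append, List.length_replicate,
      List.length_cons, List.length_nil, List.getElem_replicate, List.getElem_singleton]
    split_ifs <;> first | rfl | omega

-- A's inner body written through cellV
theorem pv_body_eq (n i j : Int) (g : List (List String)) :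
    pvStep n i g j
    = (if PySem.Int.mod n 2 = 1 then
        pvSet (pvSet g i j (cellV n i j)) (PySem.Int.floordiv n 2) (PySem.Int.floordiv n 2) " "
      else pvSet g i j (cellV n i j)) := by
  simp only [pvStep, cellV]
  split_ifs <;> rfl

theorem pv_setsFold (n i : Int) (g : List (List String)) (k : Nat) :
    ((List.range k).map (fun t : Nat => (t : Int))).foldl (fun g j => pvSet g i j (cellV n i j)) g
      = g.modify i.toNat (fun row =>
          ((List.range k).map (fun t : Nat => (t : Int))).foldl
            (fun r j => r.set j.toNat (cellV n i j)) row) := by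
  induction k with
  | zero => simp [pv_modify_id]
  | succ k ih =>
    rw [List.range_succ, List.map_append, List.foldl_append]
    simp only [List.foldl_append]
    rw [ih]
    simp only [List.map_cons, List.map_nil, List.foldl_cons, List.foldl_nil]
    rw [pvSet, pv_modify_modify]

theorem pv_interFold (n i : Int) (mt : Nat) (g : List (List String)) (k : Nat) (hk : 1 ≤ k) :
    ((List.range k).map (fun t : Nat => (t : Int))).foldl
        (fun g j => (pvSet g i j (cellV n i j)).modify mt (fun row => row.set mt " ")) g
      = (((List.range k).map (fun t : Nat => (t : Int))).foldl
          (fun g j => pvSet g i j (cellV n i j)) g).modify mt (fun row => row.set mt " ") := by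
  induction k with
  | zero => omega
  | succ k ih =>
    rcases Nat.eq_or_lt_of_le hk with hk1 | hk2
    · simp only [← hk1, List.range_one, List.map_cons, List.map_nil, List.foldl_cons, List.foldl_nil]
    · have hk' : 1 ≤ k := by omega
      rw [List.range_succ, List.map_append, List.foldl_append]
      simp only [List.foldl_append]
      rw [ih hk']
      simp only [List.map_cons, List.map_nil, List.foldl_cons, List.foldl_nil]
      show (pvSet ((List.foldl _ g _).modify mt _) i _ _).modify mt _ = _
      rw [pvSet]
      exact pv_center_absorb _ _ _ _ _ _ _ (Or.inl rfl)

theorem pv_pyRange_eq (n : Int) (hn : 0 ≤ n) :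
    PySem.List.pyRange 0 n 1 = (List.range n.toNat).map (fun t : Nat => (t : Int)) := by
  conv_lhs => rw [← Int.toNat_of_nonneg hn]
  exact PySem.List.pyRange_zero_natCast _

-- A's inner loop over row i, interleaved centre writes eliminated
theorem pv_inner (n i : Int) (g : List (List String)) (h0 : 0 ≤ i) (hi : i < n)
    (hrow : ∀ x, g[i.toNat]? = some x → x.length = n.toNat) :
    (PySem.List.pyRange 0 n 1).foldl (pvStep n i) g
    = (if PySem.Int.mod n 2 = 1 then
        (g.modify i.toNat (fun _ => rowP n i)).modify (PySem.Int.floordiv n 2).toNat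
          (fun row => row.set (PySem.Int.floordiv n 2).toNat " ")
      else g.modify i.toNat (fun _ => rowP n i)) := by
  have hn : 0 < n := lt_of_le_of_lt h0 hi
  have hN1 : 1 ≤ n.toNat := by omega
  rw [pv_pyRange_eq n hn.le]
  have hb : pvStep n i
      = (fun g j => if PySem.Int.mod n 2 = 1 then
          (pvSet g i j (cellV n i j)).modify (PySem.Int.floordiv n 2).toNat
            (fun row => row.set (PySem.Int.floordiv n 2).toNat " ")
        else pvSet g i j (cellV n i j)) := by
    funext g j
    exact pv_body_eq n i j g
  rw [hb]
  have hcongr : g.modify i.toNat (fun row =>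
        ((List.range n.toNat).map (fun t : Nat => (t : Int))).foldl
          (fun r j => r.set j.toNat (cellV n i j)) row)
      = g.modify i.toNat (fun _ => rowP n i) := by
    apply pv_modify_congr
    intro x hx
    rw [pv_rowFold n i x n.toNat (le_refl _) (hrow x hx)]
    have hdx : x.drop n.toNat = [] := by rw [← hrow x hx]; exact List.drop_length
    rw [hdx, List.append_nil, ← pv_rowP_eq n i h0 hi]
  by_cases hodd : PySem.Int.mod n 2 = 1
  · simp only [hodd, if_true]
    rw [pv_interFold n i _ g n.toNat hN1, pv_setsFold n i g n.toNat, hcongr]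
  · simp only [hodd, if_false]
    rw [pv_setsFold n i g n.toNat, hcongr]

theorem pv_rowP_len (n i : Int) (h0 : 0 ≤ i) (hi : i < n) : (rowP n i).length = n.toNat := by
  simp [rowP]; omega

theorem pv_blank_len (n : Int) :
    ∀ (t : Nat) (x : List String), (grille_vide n)[t]? = some x → x.length = n.toNat := by
  intro t x hx
  unfold grille_vide at hx
  rw [List.getElem?_map] at hx
  rcases h : (PySem.List.pyRange 0 n 1)[t]? with _ | y
  · rw [h] at hx; simp at hx
  · rw [h] at hx
    simp only [Option.map_some, Option.some_inj] at hx
    rw [← hx]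
    simp [PySem.List.length_pyRange_one]

theorem pv_G_len (n : Int) (_hn : 0 < n) (k : Nat) (hk : k ≤ n.toNat) :
    ∀ (t : Nat) (x : List String),
      ((List.range k).map (fun t : Nat => rowP n (t : Int)) ++ (grille_vide n).drop k)[t]? = some x →
        x.length = n.toNat := by
  intro t x hx
  rw [List.getElem?_append] at hx
  by_cases ht : t < k
  · rw [if_pos (by simpa using ht)] at hx
    rw [List.getElem?_map] at hx
    rw [List.getElem?_range ht] at hx
    simp only [Option.map_some, Option.some_inj] at hx
    rw [← hx]
    exact pv_rowP_len n t (by omega) (by omega)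
  · rw [if_neg (by simpa using ht)] at hx
    rw [List.getElem?_drop] at hx
    exact pv_blank_len n _ x (by simpa using hx)

theorem pv_G_step (n : Int) (_hn : 0 < n) (k : Nat) (hk : k < n.toNat) :
    ((List.range k).map (fun t : Nat => rowP n (t : Int)) ++ (grille_vide n).drop k).modify k
        (fun _ => rowP n (k : Int))
      = (List.range (k+1)).map (fun t : Nat => rowP n (t : Int)) ++ (grille_vide n).drop (k+1) := by
  have hbl : (grille_vide n).length = n.toNat := by
    simp [grille_vide, PySem.List.length_pyRange_one]
  have hm := pv_modify_append ((List.range k).map (fun t : Nat => rowP n (t : Int)))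
    ((grille_vide n).drop k) (fun _ => rowP n (k : Int))
  rw [List.length_map, List.length_range] at hm
  rw [hm, List.drop_eq_getElem_cons (by omega : k < (grille_vide n).length)]
  rw [List.modify_zero_cons]
  rw [List.range_succ, List.map_append, List.append_assoc]
  rfl

-- the outer loop: the grid after processing rows 0..k-1
theorem pv_outer (n : Int) (hn : 0 < n) (k : Nat) (hk : k ≤ n.toNat) :
    (((List.range k).map (fun t : Nat => (t : Int))).foldl (fun g i =>
      (PySem.List.pyRange 0 n 1).foldl (pvStep n i) g) (grille_vide n))
    = (if PySem.Int.mod n 2 = 1 ∧ 1 ≤ k then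
        ((List.range k).map (fun t : Nat => rowP n (t : Int)) ++ (grille_vide n).drop k).modify
          (PySem.Int.floordiv n 2).toNat (fun row => row.set (PySem.Int.floordiv n 2).toNat " ")
      else (List.range k).map (fun t : Nat => rowP n (t : Int)) ++ (grille_vide n).drop k) := by
  induction k with
  | zero => simp
  | succ k ih =>
    conv_lhs => rw [List.range_succ, List.map_append, List.foldl_append,
      List.map_cons, List.map_nil, List.foldl_cons, List.foldl_nil]
    rw [ih (by omega)]
    have hik : (0 : Int) ≤ ((k : Nat) : Int) := by omega
    have hikn : (((k : Nat) : Int)) < n := by omega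
    by_cases hodd : PySem.Int.mod n 2 = 1
    · have hcnew : PySem.Int.mod n 2 = 1 ∧ 1 ≤ k + 1 := ⟨hodd, by omega⟩
      by_cases hk1 : 1 ≤ k
      · rw [if_pos (⟨hodd, hk1⟩ : PySem.Int.mod n 2 = 1 ∧ 1 ≤ k)]
        rw [pv_inner n k _ hik hikn (by
          intro x hx
          rw [List.getElem?_modify] at hx
          rcases h : ((List.range k).map (fun t : Nat => rowP n (t : Int))
              ++ (grille_vide n).drop k)[((k : Int)).toNat]? with _ | y
          · rw [h] at hx; simp at hx
          · rw [h] at hx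
            have hy := pv_G_len n hn k (by omega) _ y h
            have hx' : (if (PySem.Int.floordiv n 2).toNat = ((k : Int)).toNat then
                y.set (PySem.Int.floordiv n 2).toNat " " else y) = x := by
              simpa using hx
            rw [← hx']
            split_ifs <;> simp [hy])]
        rw [if_pos hodd, if_pos hcnew]
        have habs := pv_center_absorb
          ((List.range k).map (fun t : Nat => rowP n (t : Int)) ++ (grille_vide n).drop k)
          ((k : Int)).toNat 0 (PySem.Int.floordiv n 2).toNat (PySem.Int.floordiv n 2).toNat " "
          (fun _ => rowP n (k : Int)) (Or.inr ⟨rowP n (k : Int), rfl⟩)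
        rw [habs]
        simp only [Int.toNat_natCast]
        rw [pv_G_step n hn k (by omega)]
      · have hk0 : k = 0 := by omega
        subst hk0
        simp only [Nat.cast_zero]
        rw [if_neg (show ¬ (PySem.Int.mod n 2 = 1 ∧ 1 ≤ 0) by simp)]
        rw [pv_inner n 0 _ (by omega) (by omega) (fun x hx => pv_blank_len n _ x
          (by simpa using hx))]
        rw [if_pos hodd, if_pos hcnew]
        have hg0 := pv_G_step n hn 0 (by omega)
        simp only [Nat.cast_zero] at hg0
        rw [show ((0 : Int)).toNat = 0 from rfl, hg0]
    · rw [if_neg (show ¬ (PySem.Int.mod n 2 = 1 ∧ 1 ≤ k) from fun h => hodd h.1)]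
      rw [pv_inner n k _ hik hikn (fun x hx => pv_G_len n hn k (by omega) _ x hx)]
      rw [if_neg hodd, if_neg (show ¬ (PySem.Int.mod n 2 = 1 ∧ 1 ≤ k + 1) from fun h => hodd h.1)]
      simp only [Int.toNat_natCast]
      exact pv_G_step n hn k (by omega)

-- A's port computes the canonical grid
theorem pv_A_canon : ∀ (n : Int), Pre_grille_init n → grille_init n = pvCanon n := by
  intro n hpre
  by_cases hn : 0 < n
  · have hN1 : 1 ≤ n.toNat := by omega
    have hdrop : (grille_vide n).drop n.toNat = [] := by
      rw [← (show (grille_vide n).length = n.toNat from by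
        simp [grille_vide, PySem.List.length_pyRange_one])]
      exact List.drop_length
    rw [pvCanon]
    show (PySem.List.pyRange 0 n 1).foldl (fun g i =>
        (PySem.List.pyRange 0 n 1).foldl (pvStep n i) g) (grille_vide n) = _
    have houter := pv_outer n hn n.toNat (le_refl _)
    rw [← pv_pyRange_eq n hn.le] at houter
    rw [houter, hdrop, List.append_nil]
    rw [pv_pyRange_eq n hn.le, List.map_map]
    by_cases hodd : PySem.Int.mod n 2 = 1
    · rw [if_pos (⟨hodd, hN1⟩ : PySem.Int.mod n 2 = 1 ∧ 1 ≤ n.toNat), if_pos hodd]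
      rfl
    · rw [if_neg (show ¬ (PySem.Int.mod n 2 = 1 ∧ 1 ≤ n.toNat) from fun h => hodd h.1),
        if_neg hodd]
      rfl
  · have hpy : PySem.List.pyRange 0 n 1 = [] := PySem.List.pyRange_one_eq_nil (by omega)
    rw [pvCanon, hpy]
    simp [grille_init, grille_vide, hpy]

-- ---- B-side lemmas ----

theorem pv_fd2 (n : Int) : PySem.Int.floordiv n 2 = n / 2 :=
  PySem.Int.floordiv_eq_ediv_of_pos (by omega)

theorem pv_mod2 (n : Int) : PySem.Int.mod n 2 = n % 2 :=
  PySem.Int.mod_eq_emod_of_pos (by omega)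

-- a top row below the diagonal, as rowP
theorem pv_rowP_lt (n i : Int) (h0 : 0 ≤ i) (hi : i < PySem.Int.floordiv n 2) :
    rowP n i = List.replicate (n - 1 - i).toNat "*" ++ List.replicate (i + 1).toNat "o" := by
  rw [pv_fd2] at hi
  rw [rowP, pv_fd2, if_neg (by omega), show (i + 1).toNat = i.toNat + 1 by omega,
    List.replicate_succ, List.append_assoc]
  rfl

-- a row at or below the middle, as two runs
theorem pv_rowP_ge (n i : Int) (hm : PySem.Int.floordiv n 2 ≤ i) (hi : i < n) :
    rowP n i = List.replicate (n - i).toNat "*" ++ List.replicate i.toNat "o" := by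
  rw [pv_fd2] at hm
  rw [rowP, pv_fd2, if_pos (by omega), show (n - i).toNat = (n - 1 - i).toNat + 1 by omega,
    List.replicate_succ', List.append_assoc]

-- mirroring (reverse + colour swap) a top row i yields row n-1-i
theorem pv_mirror_row (n i : Int) (h0 : 0 ≤ i) (hi : i < PySem.Int.floordiv n 2) :
    ((List.replicate (n - 1 - i).toNat "*" ++ List.replicate (i + 1).toNat "o").reverse.map pvSwap)
      = rowP n (n - 1 - i) := by
  have hm := hi; rw [pv_fd2] at hm
  have hswo : pvSwap "o" = "*" := by decide
  have hsws : pvSwap "*" = "o" := by decide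
  rw [pv_rowP_ge n (n - 1 - i) (by rw [pv_fd2]; omega) (by omega),
    show (n - (n - 1 - i)).toNat = (i + 1).toNat by omega]
  simp [List.reverse_append, List.map_replicate, hswo, hsws]

-- B's port computes the canonical grid
theorem pv_B_canon : ∀ (n : Int), Pre_grille_init n → grille_init_alt n = pvCanon n := by
  intro n hpre
  unfold Pre_grille_init at hpre
  rw [pv_mod2] at hpre
  by_cases hn : 0 < n
  · have hm0 : (0 : Int) ≤ PySem.Int.floordiv n 2 := by rw [pv_fd2]; omega
    have hMc : ((PySem.Int.floordiv n 2).toNat : Int) = n / 2 := by rw [pv_fd2]; omega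
    set M := (PySem.Int.floordiv n 2).toNat with hM
    -- the top rows are the first M canonical rows
    have htop : (PySem.List.pyRange 0 (PySem.Int.floordiv n 2) 1).map (fun i =>
          List.replicate (n - 1 - i).toNat "*" ++ List.replicate (i + 1).toNat "o")
        = (List.range M).map (fun t : Nat => rowP n (t : Int)) := by
      rw [pv_pyRange_eq _ hm0, List.map_map]
      apply List.map_congr_left
      intro t ht
      rw [List.mem_range] at ht
      simp only [Function.comp]
      exact (pv_rowP_lt n t (by omega) (by rw [pv_fd2]; omega)).symm
    -- the mirrored top rows are the last M canonical rows
    have hbot : (((List.range M).map (fun t : Nat => rowP n (t : Int))).reverse.map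
          (fun row => row.reverse.map pvSwap))
        = (List.range M).map (fun k : Nat => rowP n ((n.toNat - M + k : Nat) : Int)) := by
      apply List.ext_getElem
      · simp
      · intro k h1 h2
        simp only [List.length_map, List.length_reverse, List.length_range] at h1 h2
        simp only [List.getElem_map, List.getElem_reverse, List.length_map, List.length_range,
          List.getElem_range]
        rw [pv_rowP_lt n ((M - 1 - k : Nat) : Int) (by omega) (by rw [pv_fd2]; omega)]
        rw [pv_mirror_row n ((M - 1 - k : Nat) : Int) (by omega) (by rw [pv_fd2]; omega)]
        congr 1
        omega
    unfold grille_init_alt pvCanon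
    simp only []
    rw [htop, pv_pyRange_eq n hn.le, List.map_map]
    by_cases hodd : PySem.Int.mod n 2 = 1
    · have hodd' : n % 2 = 1 := by rw [pv_mod2] at hodd; exact hodd
      rw [if_pos hodd, if_pos hodd, hbot]
      rw [show n.toNat = (M + 1) + M from by omega, List.range_add, List.range_succ]
      simp only [List.map_append, List.map_map, List.map_cons, Function.comp_def,
        List.append_assoc, List.cons_append, List.nil_append, ← hM]
      have hbot' : (List.range M).map (fun k : Nat => rowP n ((M + 1 + M - M + k : Nat) : Int))
          = (List.range M).map (fun x : Nat => rowP n ((M + 1 + x : Nat) : Int)) :=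
        List.map_congr_left (fun k hk => by congr 1; omega)
      rw [hbot']
      have hmod := pv_modify_append ((List.range M).map (fun t : Nat => rowP n (t : Int)))
        (rowP n ((M : Nat) : Int) ::
          (List.range M).map (fun x : Nat => rowP n ((M + 1 + x : Nat) : Int)))
        (fun row => row.set M " ")
      rw [List.length_map, List.length_range] at hmod
      have hmid : (rowP n ((M : Nat) : Int)).set M " "
          = List.replicate M "*" ++ " " :: List.replicate M "o" := by
        rw [rowP, pv_fd2, if_pos (by omega),
          show ((n : Int) - 1 - ((M : Nat) : Int)).toNat = M from by omega,
          show (((M : Nat) : Int)).toNat = M from by omega, List.append_assoc,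
          List.singleton_append,
          List.set_append_right _ _ (by simp), List.length_replicate, Nat.sub_self,
          List.set_cons_zero]
      rw [hmod, List.modify_zero_cons, hmid]
    · have hodd' : n % 2 = 0 := by rw [pv_mod2] at hodd; omega
      rw [if_neg hodd, if_neg hodd, hbot]
      rw [show n.toNat = M + M from by omega, List.range_add, List.map_append, List.map_map]
      simp only [Function.comp_def]
      congr 1
      exact List.map_congr_left (fun k hk => by congr 1; omega)
  · have hm2 : ¬ (n % 2 = 1) := by omega
    have h1 : PySem.List.pyRange 0 (n / 2) 1 = [] := PySem.List.pyRange_one_eq_nil (by omega)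
    have h2 : PySem.List.pyRange 0 n 1 = [] := PySem.List.pyRange_one_eq_nil (by omega)
    simp [grille_init_alt, pvCanon, h1, h2, hm2]

-- ===== VERDICT (by name: the statement is the Claim_ definition above) =====
theorem grille_init_spec : Claim_equal_grille_init := by
  intro n _ hpre
  unfold Spec_grille_init
  rw [pv_A_canon n hpre, pv_B_canon n hpre]
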